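-- pv_equiv track=rewrite | github.com/mfngoi/golf_server | Golf_Analyser.py | get_start_end_clusters
-- ===== SOURCE A (Python) =====
-- def get_start_end_clusters(labels):
--
--     cluster_info = []
--     startIndex = 0
--     for i in range(len(labels)-1):
--         if(labels[i+1] != labels[i]):
--             cluster_info.append({'label': labels[i], 'start': startIndex, 'end': i})
--             startIndex = i+1
--
--     cluster_info.append({'label': labels[len(labels)-1], 'start': startIndex, 'end': len(labels)-1})
--     return cluster_info
-- ===== SOURCE B (Python) =====
-- def get_start_end_clusters(labels):
--     n = len(labels)
--     cluster_info = []
--     start = 0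
--     while True:
--         # inner scan: jump to the last index of the run beginning at `start`
--         end = start
--         while end + 1 < n and labels[end + 1] == labels[start]:
--             end += 1
--         cluster_info.append({'label': labels[start], 'start': start, 'end': end})
--         if end + 1 >= n:
--             return cluster_info
--         start = end + 1
-- ===== Notes on version B (the rewrite author's own statement) =====
-- stated objective: alternative
-- what changed: B replaces A's single flat index scan with a boundary test by a run-jumping nested loop: an outer loop that emits one cluster per iteration, using an inner scan that advances `end` to the last index of the current run (comparing against labels[start], not neighbours), then jumps start past the run.
import Mathlib
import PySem

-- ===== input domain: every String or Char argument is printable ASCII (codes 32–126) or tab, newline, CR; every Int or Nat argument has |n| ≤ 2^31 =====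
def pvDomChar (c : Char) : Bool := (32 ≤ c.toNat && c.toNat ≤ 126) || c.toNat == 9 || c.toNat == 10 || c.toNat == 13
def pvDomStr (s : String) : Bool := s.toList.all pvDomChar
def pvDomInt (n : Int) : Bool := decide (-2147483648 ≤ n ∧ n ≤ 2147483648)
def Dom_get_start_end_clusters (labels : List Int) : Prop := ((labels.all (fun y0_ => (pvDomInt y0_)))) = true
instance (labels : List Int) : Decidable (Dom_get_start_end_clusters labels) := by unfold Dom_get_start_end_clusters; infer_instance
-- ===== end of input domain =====

-- B replaces A's flat boundary-test scan by a run-jumping nested loop (outer loop per cluster,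
-- inner scan to the end of each run); same return value, stated as an alternative decomposition.


-- ===== PORT A =====
-- the dict {'label': …, 'start': …, 'end': …} is the association list [("label",…),("start",…),("end",…)]
def get_start_end_clusters (labels : List Int) : List (List (String × Int)) :=
  let st := (PySem.List.pyRange 0 ((labels.length : Int) - 1) 1).foldl
    (fun (st : List (List (String × Int)) × Int) i =>
      if PySem.List.pyGetD labels (i + 1) 0 ≠ PySem.List.pyGetD labels i 0 then
        (st.1 ++ [[("label", PySem.List.pyGetD labels i 0), ("start", st.2), ("end", i)]], i + 1)
      else st) ([], 0)
  st.1 ++ [[("label", PySem.List.pyGetD labels ((labels.length : Int) - 1) 0),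
            ("start", st.2), ("end", (labels.length : Int) - 1)]]

-- ===== PORT B =====
-- inner `while end + 1 < n and labels[end+1] == labels[start]` loop of Source B
-- (fuel-guarded structural recursion; fuel = labels.length always suffices, see altScan_stop)
def altScan (labels : List Int) (start : Int) : Nat → Int → Int
  | 0, e => e
  | f + 1, e =>
    if e + 1 < (labels.length : Int) ∧
        PySem.List.pyGetD labels (e + 1) 0 = PySem.List.pyGetD labels start 0 then
      altScan labels start f (e + 1)
    else e

-- outer `while True` loop of Source B (fuel-guarded; fuel = labels.length suffices for labels ≠ [])
def altOuter (labels : List Int) : Nat → List (List (String × Int)) → Int →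
    List (List (String × Int))
  | 0, acc, _ => acc
  | f + 1, acc, start =>
    let e := altScan labels start labels.length start
    let acc' := acc ++ [[("label", PySem.List.pyGetD labels start 0), ("start", start), ("end", e)]]
    if e + 1 ≥ (labels.length : Int) then acc'
    else altOuter labels f acc' (e + 1)

def get_start_end_clusters_alt (labels : List Int) : List (List (String × Int)) :=
  altOuter labels labels.length [] 0

-- ===== PRECONDITION & SPEC =====
-- Pre_ excludes only the empty list, on which Python A (and B) raises IndexError.
def Pre_get_start_end_clusters (labels : List Int) : Prop := labels ≠ []
instance (labels : List Int) : Decidable (Pre_get_start_end_clusters labels) := by unfold Pre_get_start_end_clusters; infer_instance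
def pvWitness_get_start_end_clusters : List Int := [1, 1, 2]

def Spec_get_start_end_clusters (labels : List Int) (out : List (List (String × Int))) : Prop := out = get_start_end_clusters_alt labels
instance (labels : List Int) (out : List (List (String × Int))) : Decidable (Spec_get_start_end_clusters labels out) := by unfold Spec_get_start_end_clusters; infer_instance

-- ===== CLAIM (what is proved, stated in full; the proofs are below) =====
def Claim_equal_get_start_end_clusters : Prop := ∀ (labels : List Int), Dom_get_start_end_clusters labels → Pre_get_start_end_clusters labels → Spec_get_start_end_clusters labels (get_start_end_clusters labels)

-- ===== LEMMAS AND PROOFS =====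

-- the inner scan never moves `end` backwards
theorem altScan_ge (labels : List Int) (start : Int) :
    ∀ (f : Nat) (e : Int), e ≤ altScan labels start f e := by
  intro f
  induction f with
  | zero => intro e; exact le_rfl
  | succ f ih =>
    intro e
    rw [altScan]
    split
    · have := ih (e + 1); omega
    · exact le_rfl

-- the scan never runs past the last index
theorem altScan_le (labels : List Int) (start : Int) :
    ∀ (f : Nat) (e : Int), e ≤ (labels.length : Int) - 1 →
      altScan labels start f e ≤ (labels.length : Int) - 1 := by
  intro f
  induction f with
  | zero => intro e he; exact he
  | succ f ih =>
    intro e he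
    rw [altScan]
    split
    · rename_i h; exact ih (e + 1) (by omega)
    · exact he

-- every index from the scan's origin up to its result carries the run's label
theorem altScan_run (labels : List Int) (start : Int) :
    ∀ (f : Nat) (e : Int), PySem.List.pyGetD labels e 0 = PySem.List.pyGetD labels start 0 →
      ∀ i : Int, e ≤ i → i ≤ altScan labels start f e →
        PySem.List.pyGetD labels i 0 = PySem.List.pyGetD labels start 0 := by
  intro f
  induction f with
  | zero =>
    intro e he i h1 h2
    rw [altScan] at h2
    have : i = e := by omega
    subst this; exact he
  | succ f ih =>
    intro e he i h1 h2
    rw [altScan] at h2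
    by_cases hc : e + 1 < (labels.length : Int) ∧
        PySem.List.pyGetD labels (e + 1) 0 = PySem.List.pyGetD labels start 0
    · rw [if_pos hc] at h2
      by_cases hi : e + 1 ≤ i
      · exact ih (e + 1) hc.2 i hi h2
      · have : i = e := by omega
        subst this; exact he
    · rw [if_neg hc] at h2
      have : i = e := by omega
      subst this; exact he

-- with fuel at least the distance to the last index, the scan stops at a genuine run end
theorem altScan_stop (labels : List Int) (start : Int) :
    ∀ (f : Nat) (e : Int), ((labels.length : Int) - 1 - e).toNat ≤ f →
      ¬ (altScan labels start f e + 1 < (labels.length : Int) ∧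
         PySem.List.pyGetD labels (altScan labels start f e + 1) 0
           = PySem.List.pyGetD labels start 0) := by
  intro f
  induction f with
  | zero =>
    intro e hf
    rw [altScan]
    intro h; omega
  | succ f ih =>
    intro e hf
    rw [altScan]
    split
    · rename_i hc
      exact ih (e + 1) (by omega)
    · assumption

-- A's fold does nothing on an index interval with no boundary
theorem fold_skip (labels : List Int) :
    ∀ (k : Nat) (a b : Int) (st : List (List (String × Int)) × Int),
      (b - a).toNat = k →
      (∀ i : Int, a ≤ i → i < b → PySem.List.pyGetD labels (i + 1) 0 = PySem.List.pyGetD labels i 0) →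
      (PySem.List.pyRange a b 1).foldl
        (fun (st : List (List (String × Int)) × Int) i =>
          if PySem.List.pyGetD labels (i + 1) 0 ≠ PySem.List.pyGetD labels i 0 then
            (st.1 ++ [[("label", PySem.List.pyGetD labels i 0), ("start", st.2), ("end", i)]], i + 1)
          else st) st = st := by
  intro k
  induction k with
  | zero =>
    intro a b st hk _
    rw [PySem.List.pyRange_one_eq_nil (by omega)]
    rfl
  | succ k ih =>
    intro a b st hk hno
    have hab : a < b := by omega
    rw [PySem.List.pyRange_one_cons hab]
    simp only [List.foldl_cons, hno a le_rfl hab, ne_eq, not_true_eq_false, if_neg,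
      not_false_eq_true]
    exact ih (a + 1) b st (by omega) (fun i h1 h2 => hno i (by omega) h2)

-- main invariant: from run start `start` with accumulator `acc`, A's remaining fold plus
-- the final append equals B's outer loop (with any sufficient fuel)
theorem main_inv (labels : List Int) :
    ∀ (k : Nat) (start : Int) (acc : List (List (String × Int))),
      0 ≤ start → start ≤ (labels.length : Int) - 1 →
      ((labels.length : Int) - 1 - start).toNat < k →
      (let st := (PySem.List.pyRange start ((labels.length : Int) - 1) 1).foldl
        (fun (st : List (List (String × Int)) × Int) i =>
          if PySem.List.pyGetD labels (i + 1) 0 ≠ PySem.List.pyGetD labels i 0 then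
            (st.1 ++ [[("label", PySem.List.pyGetD labels i 0), ("start", st.2), ("end", i)]], i + 1)
          else st) (acc, start)
       st.1 ++ [[("label", PySem.List.pyGetD labels ((labels.length : Int) - 1) 0),
                 ("start", st.2), ("end", (labels.length : Int) - 1)]])
      = altOuter labels k acc start := by
  intro k
  induction k with
  | zero => intro start acc h0 hlt hk; omega
  | succ k ih =>
    intro start acc h0 hlt hk
    set n : Int := (labels.length : Int) with hn
    set e : Int := altScan labels start labels.length start with he
    have hge : start ≤ e := altScan_ge labels start labels.length start
    have hstop := altScan_stop labels start labels.length start (by omega)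
    rw [← he] at hstop
    have hrun := altScan_run labels start labels.length start rfl
    rw [← he] at hrun
    have hle : e ≤ n - 1 := altScan_le labels start labels.length start hlt
    -- boundary-free interval [start, e)
    have hno : ∀ i : Int, start ≤ i → i < e →
        PySem.List.pyGetD labels (i + 1) 0 = PySem.List.pyGetD labels i 0 := by
      intro i h1 h2
      rw [hrun i h1 (by omega), hrun (i + 1) (by omega) (by omega)]
    by_cases hend : e = n - 1
    · -- run reaches the end of the list: A's fold does nothing more
      rw [altOuter, ← he, if_pos (by omega)]
      rw [show PySem.List.pyRange start (n - 1) 1 =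
            PySem.List.pyRange start e 1 from by rw [hend]]
      simp only [fold_skip labels (e - start).toNat start e (acc, start) rfl hno]
      rw [← hend, hrun e hge le_rfl]
    · -- the scan stopped at a label change: e < n - 1, boundary fires at i = e
      have helt : e < n - 1 := by omega
      have hne : PySem.List.pyGetD labels (e + 1) 0 ≠ PySem.List.pyGetD labels start 0 := by
        intro hc; exact hstop ⟨by omega, hc⟩
      rw [show PySem.List.pyRange start (n - 1) 1 =
            (PySem.List.pyRange start e 1 ++ [e]) ++ PySem.List.pyRange (e + 1) (n - 1) 1 from by
        rw [← PySem.List.pyRange_one_succ_right hge,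
            ← PySem.List.pyRange_one_append start (e + 1) (n - 1) (by omega) (by omega)]]
      rw [List.foldl_append, List.foldl_append]
      rw [fold_skip labels (e - start).toNat start e (acc, start) rfl hno]
      have hlab : PySem.List.pyGetD labels e 0 = PySem.List.pyGetD labels start 0 :=
        hrun e hge le_rfl
      simp only [List.foldl_cons, List.foldl_nil, hlab, ne_eq, hne, not_false_eq_true, if_pos]
      rw [altOuter, ← he, if_neg (by omega)]
      exact ih (e + 1) (acc ++ [[("label", PySem.List.pyGetD labels start 0),
        ("start", start), ("end", e)]]) (by omega) (by omega) (by omega)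

-- ===== VERDICT (by name: the statement is the Claim_ definition above) =====
theorem get_start_end_clusters_spec : Claim_equal_get_start_end_clusters := by
  intro labels _ hpre
  have hn : 1 ≤ (labels.length : Int) := by
    have : labels.length ≠ 0 := fun h => hpre (List.eq_nil_of_length_eq_zero h)
    omega
  unfold Spec_get_start_end_clusters get_start_end_clusters get_start_end_clusters_alt
  exact main_inv labels labels.length 0 [] le_rfl (by omega) (by omega)
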